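-- pv_equiv track=rewrite | github.com/AlejandroGarciaBautista/TFG-SDN | NetworkSchema.py | generar_ips_enlaces
-- ===== SOURCE A (Python) =====
-- import ipaddress
--
-- def generar_ips_enlaces(N, M, redundancia=False):
--     # Rango de direcciones para enlaces Spine-Leaf: 10.0.0.0/16
--     red_spine_leaf = ipaddress.IPv4Network('10.0.0.0/16')
--
--     # Variables para el cálculo de direcciones IP
--     enlace_ip_list = []
--
--     # Generador de direcciones /30 para enlaces entre Spine y Leaf
--     enlace_start = iter(red_spine_leaf.subnets(new_prefix=30))
--
--     # Generar enlaces para cada combinación Spine-Leaf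
--     for spine in range(1, N + 1):
--         for leaf in range(1, M + 1):
--             # Para cada combinación, asignamos 1 o 2 enlaces, dependiendo de la redundancia
--             num_enlaces = 2 if redundancia else 1
--
--             for enlace_num in range(num_enlaces):
--                 subred = next(enlace_start)  # Obtener la siguiente subred /30
--                 ip1, ip2 = list(subred.hosts())[:2]  # Tomamos las 2 primeras IPs
--                 # Añadir el enlace con la subred y direcciones IP correspondientes
--                 enlace_ip_list.append({
--                     "spine": f"Spine{spine}",
--                     "leaf": f"Leaf{leaf}",
--                     "subnet": str(subred),
--                     "ip1": str(ip1),
--                     "ip2": str(ip2)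
--                 })
--
--     return enlace_ip_list
-- ===== SOURCE B (Python) =====
-- def generar_ips_enlaces(N, M, redundancia=False):
--     # Flat single pass: no ipaddress generator; each /30 subnet is computed
--     # directly from a running link index via arithmetic on the 10.0.0.0/16 range.
--     k = 2 if redundancia else 1
--     if N < 1 or M < 1:
--         return []
--     total = N * M * k
--     if total > 16384:  # more links than /30 subnets fit in 10.0.0.0/16
--         raise ValueError("10.0.0.0/16 exhausted: too many spine-leaf links")
--     def entry(idx):
--         pair = idx // k
--         spine = pair // M + 1
--         leaf = pair % M + 1
--         base = idx * 4
--         o3, o4 = divmod(base, 256)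
--         return {
--             "spine": f"Spine{spine}",
--             "leaf": f"Leaf{leaf}",
--             "subnet": f"10.0.{o3}.{o4}/30",
--             "ip1": f"10.0.{o3}.{o4 + 1}",
--             "ip2": f"10.0.{o3}.{o4 + 2}",
--         }
--     return [entry(idx) for idx in range(total)]
-- ===== Notes on version B (the rewrite author's own statement) =====
-- stated objective: faster
-- what changed: Replaces the nested loops consuming an ipaddress subnets() generator by a single flat pass over the link index, recovering spine/leaf by div/mod and computing each /30 subnet and host addresses by plain integer arithmetic and string formatting (no ipaddress objects at all).
import Mathlib
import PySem

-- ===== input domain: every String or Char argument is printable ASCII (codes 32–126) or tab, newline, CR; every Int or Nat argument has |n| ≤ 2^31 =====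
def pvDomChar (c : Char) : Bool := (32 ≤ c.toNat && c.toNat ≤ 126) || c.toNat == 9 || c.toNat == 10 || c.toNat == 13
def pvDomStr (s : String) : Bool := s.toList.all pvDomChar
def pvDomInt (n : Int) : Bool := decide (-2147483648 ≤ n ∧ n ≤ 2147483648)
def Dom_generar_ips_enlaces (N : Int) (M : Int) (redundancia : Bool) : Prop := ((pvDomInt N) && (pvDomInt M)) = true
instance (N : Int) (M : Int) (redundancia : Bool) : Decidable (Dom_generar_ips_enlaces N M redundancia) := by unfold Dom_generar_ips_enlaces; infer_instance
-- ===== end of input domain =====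

-- B replaces A's nested loops over an ipaddress subnets() generator by one flat pass
-- over the link index with pure integer arithmetic (objective: faster, constant factor).

-- ===== PORT A =====
-- str(IPv4Address(a)) for a 32-bit address integer: dotted quad (exact for 0 ≤ a < 2^32)
def pvIpStrA (a : Int) : String :=
  PySem.Int.toStr (PySem.Int.floordiv a 16777216) ++ "." ++
  PySem.Int.toStr (PySem.Int.mod (PySem.Int.floordiv a 65536) 256) ++ "." ++
  PySem.Int.toStr (PySem.Int.mod (PySem.Int.floordiv a 256) 256) ++ "." ++
  PySem.Int.toStr (PySem.Int.mod a 256)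

-- the dict A appends, for the /30 whose network address is a
def pvEntryA (spine leaf a : Int) : List (String × String) :=
  [("spine", "Spine" ++ PySem.Int.toStr spine),
   ("leaf", "Leaf" ++ PySem.Int.toStr leaf),
   ("subnet", pvIpStrA a ++ "/30"),
   ("ip1", pvIpStrA (a + 1)),
   ("ip2", pvIpStrA (a + 2))]

-- subred = next(enlace_start); the generator is modelled as the list of remaining
-- /30 network addresses; on exhaustion Python raises StopIteration (excluded by Pre_),
-- here the state is returned unchanged.
def pvNextA (spine leaf : Int) (st : List Int × List (List (String × String))) :
    List Int × List (List (String × String)) :=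
  match st with
  | ([], acc) => ([], acc)
  | (a :: rest, acc) => (rest, acc ++ [pvEntryA spine leaf a])

-- for enlace_num in range(num_enlaces)
def pvEnlA (redundancia : Bool) (spine leaf : Int)
    (st : List Int × List (List (String × String))) :
    List Int × List (List (String × String)) :=
  let num_enlaces : Int := if redundancia then 2 else 1
  (PySem.List.pyRange 0 num_enlaces 1).foldl (fun st _ => pvNextA spine leaf st) st

-- for leaf in range(1, M + 1)
def pvLeafA (M : Int) (redundancia : Bool) (spine : Int)
    (st : List Int × List (List (String × String))) :
    List Int × List (List (String × String)) :=
  (PySem.List.pyRange 1 (M + 1) 1).foldl (fun st leaf => pvEnlA redundancia spine leaf st) st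

def generar_ips_enlaces (N : Int) (M : Int) (redundancia : Bool) : List (List (String × String)) :=
  -- iter(IPv4Network('10.0.0.0/16').subnets(new_prefix=30)): the 16384 /30 networks in order
  let enlace_start : List Int := (PySem.List.pyRange 0 16384 1).map (fun i => 167772160 + 4 * i)
  ((PySem.List.pyRange 1 (N + 1) 1).foldl (fun st spine => pvLeafA M redundancia spine st)
    (enlace_start, [])).2

-- ===== PORT B =====
def pvEntryB (M k idx : Int) : List (String × String) :=
  let pair := PySem.Int.floordiv idx k
  let spine := PySem.Int.floordiv pair M + 1
  let leaf := PySem.Int.mod pair M + 1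
  let base := idx * 4
  let o3 := PySem.Int.floordiv base 256
  let o4 := PySem.Int.mod base 256
  [("spine", "Spine" ++ PySem.Int.toStr spine),
   ("leaf", "Leaf" ++ PySem.Int.toStr leaf),
   ("subnet", "10.0." ++ PySem.Int.toStr o3 ++ "." ++ PySem.Int.toStr o4 ++ "/30"),
   ("ip1", "10.0." ++ PySem.Int.toStr o3 ++ "." ++ PySem.Int.toStr (o4 + 1)),
   ("ip2", "10.0." ++ PySem.Int.toStr o3 ++ "." ++ PySem.Int.toStr (o4 + 2))]

def generar_ips_enlaces_alt (N : Int) (M : Int) (redundancia : Bool) : List (List (String × String)) :=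
  let k : Int := if redundancia then 2 else 1
  if N < 1 ∨ M < 1 then []
  else
    let total := N * M * k
    if total > 16384 then []  -- Source B raises ValueError here (outside Pre_, nothing claimed)
    else (PySem.List.pyRange 0 total 1).map (pvEntryB M k)

-- ===== PRECONDITION & SPEC =====
-- Pre_ excludes exactly the inputs where A raises StopIteration: more requested links
-- than there are /30 subnets (16384) in 10.0.0.0/16.
def Pre_generar_ips_enlaces (N : Int) (M : Int) (redundancia : Bool) : Prop :=
  (max N 0) * (max M 0) * (if redundancia then 2 else 1) ≤ 16384
instance (N : Int) (M : Int) (redundancia : Bool) : Decidable (Pre_generar_ips_enlaces N M redundancia) := by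
  unfold Pre_generar_ips_enlaces; infer_instance

def pvWitness_generar_ips_enlaces : Int × Int × Bool := (2, 3, true)

def Spec_generar_ips_enlaces (N : Int) (M : Int) (redundancia : Bool) (out : List (List (String × String))) : Prop := out = generar_ips_enlaces_alt N M redundancia
instance (N : Int) (M : Int) (redundancia : Bool) (out : List (List (String × String))) : Decidable (Spec_generar_ips_enlaces N M redundancia out) := by unfold Spec_generar_ips_enlaces; infer_instance

-- ===== CLAIM (what is proved, stated in full; the proofs are below) =====
def Claim_equal_generar_ips_enlaces : Prop := ∀ (N : Int) (M : Int) (redundancia : Bool), Dom_generar_ips_enlaces N M redundancia → Pre_generar_ips_enlaces N M redundancia → Spec_generar_ips_enlaces N M redundancia (generar_ips_enlaces N M redundancia)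

-- ===== LEMMAS AND PROOFS =====

-- the /30 network address with index j
def pvAddrOf (j : Int) : Int := 167772160 + 4 * j
-- the generator's remaining addresses after consuming c of them
def pvSubsFrom (c : Int) : List Int := (PySem.List.pyRange c 16384 1).map pvAddrOf

theorem pvSubsFrom_cons (c : Int) (h : c < 16384) :
    pvSubsFrom c = pvAddrOf c :: pvSubsFrom (c + 1) := by
  simp [pvSubsFrom, PySem.List.pyRange_one_cons h]

-- A's dict for address index c equals B's entry at link index c,
-- whenever c encodes (spine, leaf, enlace e) and fits in the /16
theorem pvEntry_eq (M k spine leaf e c : Int) (hk : k = 1 ∨ k = 2) (hM : 1 ≤ M)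
    (hs : 1 ≤ spine) (hl : 1 ≤ leaf) (hlM : leaf ≤ M) (he0 : 0 ≤ e) (hek : e < k)
    (hc : c = ((spine - 1) * M + (leaf - 1)) * k + e) (hub : c < 16384) :
    pvEntryA spine leaf (pvAddrOf c) = pvEntryB M k c := by
  have hkpos : (0:Int) < k := by omega
  have hpos : (0:Int) ≤ (spine - 1) * M + (leaf - 1) := by nlinarith
  have hc0 : 0 ≤ c := by
    have := mul_nonneg hpos hkpos.le
    omega
  have hpair : PySem.Int.floordiv c k = (spine - 1) * M + (leaf - 1) := by
    rw [PySem.Int.floordiv_eq_ediv_of_pos hkpos]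
    rcases hk with h | h <;> subst h <;> omega
  have hspine : PySem.Int.floordiv ((spine - 1) * M + (leaf - 1)) M + 1 = spine := by
    rw [PySem.Int.floordiv_eq_ediv_of_pos (by omega : (0:Int) < M)]
    have : ((spine - 1) * M + (leaf - 1)) / M = spine - 1 := by
      rw [show (spine - 1) * M + (leaf - 1) = (leaf - 1) + M * (spine - 1) from by ring,
          Int.add_mul_ediv_left _ _ (by omega : M ≠ 0),
          Int.ediv_eq_zero_of_lt (by omega) (by omega)]
      ring
    omega
  have hleaf : PySem.Int.mod ((spine - 1) * M + (leaf - 1)) M + 1 = leaf := by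
    rw [PySem.Int.mod_eq_emod_of_pos (by omega : (0:Int) < M)]
    have : ((spine - 1) * M + (leaf - 1)) % M = leaf - 1 := by
      rw [show (spine - 1) * M + (leaf - 1) = (leaf - 1) + M * (spine - 1) from by ring,
          Int.add_mul_emod_self_left, Int.emod_eq_of_lt (by omega) (by omega)]
    omega
  have h4c : 0 ≤ 4 * c ∧ 4 * c + 2 < 65536 := by omega
  -- octet arithmetic for a = 167772160 + 4c + j, j = 0, 1, 2
  have hoct : ∀ j : Int, 0 ≤ j → j ≤ 2 →
      (PySem.Int.floordiv (pvAddrOf c + j) 16777216 = 10 ∧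
       PySem.Int.mod (PySem.Int.floordiv (pvAddrOf c + j) 65536) 256 = 0 ∧
       PySem.Int.mod (PySem.Int.floordiv (pvAddrOf c + j) 256) 256 = PySem.Int.floordiv (c * 4) 256 ∧
       PySem.Int.mod (pvAddrOf c + j) 256 = PySem.Int.mod (c * 4) 256 + j) := by
    intro j hj0 hj2
    rw [PySem.Int.floordiv_eq_ediv_of_pos (by norm_num : (0:Int) < 16777216),
        PySem.Int.floordiv_eq_ediv_of_pos (by norm_num : (0:Int) < 65536),
        PySem.Int.floordiv_eq_ediv_of_pos (by norm_num : (0:Int) < 256),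
        PySem.Int.floordiv_eq_ediv_of_pos (by norm_num : (0:Int) < 256),
        PySem.Int.mod_eq_emod_of_pos (by norm_num : (0:Int) < 256),
        PySem.Int.mod_eq_emod_of_pos (by norm_num : (0:Int) < 256),
        PySem.Int.mod_eq_emod_of_pos (by norm_num : (0:Int) < 256),
        PySem.Int.mod_eq_emod_of_pos (by norm_num : (0:Int) < 256)]
    unfold pvAddrOf
    omega
  obtain ⟨q0a, q0b, q0c, q0d⟩ := hoct 0 (by omega) (by omega)
  obtain ⟨q1a, q1b, q1c, q1d⟩ := hoct 1 (by omega) (by omega)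
  obtain ⟨q2a, q2b, q2c, q2d⟩ := hoct 2 (by omega) (by omega)
  simp only [add_zero] at q0a q0b q0c q0d
  simp only [pvEntryA, pvEntryB, pvIpStrA]
  rw [hpair, hspine, hleaf, q0a, q0b, q0c, q0d, q1a, q1b, q1c, q1d, q2a, q2b, q2c, q2d]
  rfl

-- the enlace loop: consumes k addresses and appends the entries for indices [c, c+k)
theorem pvEnlA_run (redundancia : Bool) (M spine leaf c : Int) (acc : List (List (String × String)))
    (hM : 1 ≤ M) (hs : 1 ≤ spine) (hl : 1 ≤ leaf) (hlM : leaf ≤ M)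
    (hc : c = ((spine - 1) * M + (leaf - 1)) * (if redundancia then 2 else 1))
    (hub : c + (if redundancia then 2 else 1) ≤ 16384) :
    pvEnlA redundancia spine leaf (pvSubsFrom c, acc) =
      (pvSubsFrom (c + (if redundancia then 2 else 1)),
       acc ++ (PySem.List.pyRange c (c + (if redundancia then 2 else 1)) 1).map
              (pvEntryB M (if redundancia then 2 else 1))) := by
  have hc0 : 0 ≤ c := by
    have h1 : (0:Int) ≤ (spine - 1) * M + (leaf - 1) := by nlinarith
    have h2 : (0:Int) ≤ (if redundancia then 2 else 1) := by split <;> norm_num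
    rw [hc]; exact mul_nonneg h1 h2
  cases redundancia with
  | false =>
    simp only [show (if (false = true) then (2:Int) else 1) = 1 from rfl] at hc hub ⊢
    have h1 : c < 16384 := by omega
    rw [PySem.List.pyRange_one_singleton]
    simp only [pvEnlA, show (if (false = true) then (2:Int) else 1) = 1 from rfl]
    rw [show (PySem.List.pyRange 0 1 1) = [0] from by decide]
    simp only [List.foldl_cons, List.foldl_nil]
    rw [pvSubsFrom_cons c h1]
    simp only [pvNextA]
    rw [pvEntry_eq M 1 spine leaf 0 c (Or.inl rfl) hM hs hl hlM (by omega) (by omega)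
        (by rw [hc]; ring) h1]
    simp
  | true =>
    simp only [reduceIte] at hc hub ⊢
    have h1 : c < 16384 := by omega
    have h2 : c + 1 < 16384 := by omega
    rw [show (PySem.List.pyRange c (c+2) 1) = [c, c+1] from by
      rw [PySem.List.pyRange_one_cons (by omega), PySem.List.pyRange_one_cons (by omega),
          PySem.List.pyRange_one_eq_nil (by omega)]]
    simp only [pvEnlA, reduceIte]
    rw [show (PySem.List.pyRange 0 2 1) = [0, 1] from by decide]
    simp only [List.foldl_cons, List.foldl_nil]
    rw [pvSubsFrom_cons c h1]
    rw [pvSubsFrom_cons (c+1) h2]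
    simp only [pvNextA]
    rw [pvEntry_eq M 2 spine leaf 0 c (Or.inr rfl) hM hs hl hlM (by omega) (by omega)
        (by rw [hc]; ring) h1,
        pvEntry_eq M 2 spine leaf 1 (c + 1) (Or.inr rfl) hM hs hl hlM (by omega) (by omega)
        (by rw [hc]) h2]
    rw [show c + 1 + 1 = c + 2 from by ring]
    simp

-- the leaf loop, for the first m leaves of spine `spine`
theorem pvLeafA_run (redundancia : Bool) (M spine : Int) (m : Nat)
    (acc : List (List (String × String)))
    (hM : 1 ≤ M) (hs : 1 ≤ spine) (hm : (m : Int) ≤ M)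
    (hub : (spine - 1) * M * (if redundancia then 2 else 1) + (m : Int) * (if redundancia then 2 else 1) ≤ 16384) :
    (PySem.List.pyRange 1 ((m : Int) + 1) 1).foldl (fun st leaf => pvEnlA redundancia spine leaf st)
        (pvSubsFrom ((spine - 1) * M * (if redundancia then 2 else 1)), acc) =
      (pvSubsFrom ((spine - 1) * M * (if redundancia then 2 else 1) + (m : Int) * (if redundancia then 2 else 1)),
       acc ++ (PySem.List.pyRange ((spine - 1) * M * (if redundancia then 2 else 1))
                ((spine - 1) * M * (if redundancia then 2 else 1) + (m : Int) * (if redundancia then 2 else 1)) 1).map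
              (pvEntryB M (if redundancia then 2 else 1))) := by
  set k : Int := if redundancia then 2 else 1 with hkdef
  have hk1 : 1 ≤ k := by rcases Bool.eq_false_or_eq_true redundancia with h | h <;> simp [hkdef, h]
  induction m with
  | zero =>
    simp [PySem.List.pyRange_one_eq_nil (le_refl ((spine - 1) * M * k))]
  | succ n ih =>
    have hn : (n : Int) ≤ M := by push_cast at hm ⊢; omega
    have hubn : (spine - 1) * M * k + (n : Int) * k ≤ 16384 := by push_cast at hub; nlinarith
    rw [show ((n + 1 : Nat) : Int) + 1 = ((n : Int) + 1) + 1 from by push_cast; ring,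
        PySem.List.pyRange_one_succ_right (by omega : (1:Int) ≤ (n : Int) + 1),
        List.foldl_append, ih hn hubn]
    simp only [List.foldl_cons, List.foldl_nil]
    rw [pvEnlA_run redundancia M spine ((n : Int) + 1) ((spine - 1) * M * k + (n : Int) * k) _
         hM hs (by omega) (by push_cast at hm; omega)
         (by rw [← hkdef]; ring) (by rw [← hkdef]; push_cast at hub; nlinarith)]
    rw [← hkdef]
    have harith : (spine - 1) * M * k + (n : Int) * k + k = (spine - 1) * M * k + ((n + 1 : Nat) : Int) * k := by
      push_cast; ring
    rw [harith, List.append_assoc, ← List.map_append,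
        ← PySem.List.pyRange_one_append ((spine - 1) * M * k) ((spine - 1) * M * k + (n : Int) * k)
           ((spine - 1) * M * k + ((n + 1 : Nat) : Int) * k) (by nlinarith) (by push_cast; nlinarith)]

-- the spine loop, for the first s spines
theorem pvSpineA_run (redundancia : Bool) (M : Int) (s : Nat)
    (hM : 1 ≤ M)
    (hub : (s : Int) * M * (if redundancia then 2 else 1) ≤ 16384) :
    (PySem.List.pyRange 1 ((s : Int) + 1) 1).foldl (fun st spine => pvLeafA M redundancia spine st)
        (pvSubsFrom 0, []) =
      (pvSubsFrom ((s : Int) * M * (if redundancia then 2 else 1)),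
       (PySem.List.pyRange 0 ((s : Int) * M * (if redundancia then 2 else 1)) 1).map
         (pvEntryB M (if redundancia then 2 else 1))) := by
  set k : Int := if redundancia then 2 else 1 with hkdef
  have hk1 : 1 ≤ k := by rcases Bool.eq_false_or_eq_true redundancia with h | h <;> simp [hkdef, h]
  induction s with
  | zero => simp [PySem.List.pyRange_one_eq_nil (le_refl (0:Int))]
  | succ n ih =>
    have hubn : (n : Int) * M * k ≤ 16384 := by push_cast at hub; nlinarith
    rw [show ((n + 1 : Nat) : Int) + 1 = ((n : Int) + 1) + 1 from by push_cast; ring,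
        PySem.List.pyRange_one_succ_right (by omega : (1:Int) ≤ (n : Int) + 1),
        List.foldl_append, ih hubn]
    simp only [List.foldl_cons, List.foldl_nil, pvLeafA]
    have hMnat : M = ((M.toNat : Nat) : Int) := by omega
    have := pvLeafA_run redundancia M ((n : Int) + 1) M.toNat
      ((PySem.List.pyRange 0 ((n : Int) * M * k) 1).map (pvEntryB M k))
      hM (by omega) (by omega)
      (by rw [← hkdef]; push_cast at hub ⊢; nlinarith [hub, (by omega : ((M.toNat : Nat) : Int) = M)])
    rw [← hkdef] at this
    have hsimp : ((n : Int) + 1 - 1) * M * k = (n : Int) * M * k := by ring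
    rw [hsimp] at this
    rw [show M + 1 = ((M.toNat : Nat) : Int) + 1 from by omega]
    rw [this]
    have harith : (n : Int) * M * k + ((M.toNat : Nat) : Int) * k = ((n + 1 : Nat) : Int) * M * k := by
      rw [← hMnat]; push_cast; ring
    have h0 : (0:Int) ≤ (n : Int) * M * k :=
      mul_nonneg (mul_nonneg (by positivity) (by omega)) (by omega)
    have h0' : (0:Int) ≤ ((M.toNat : Nat) : Int) * k :=
      mul_nonneg (by positivity) (by omega)
    rw [harith, ← List.map_append,
        ← PySem.List.pyRange_one_append 0 ((n : Int) * M * k) (((n + 1 : Nat) : Int) * M * k)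
          h0 (by rw [← harith]; omega)]

-- degenerate case M < 1: every pvLeafA is the identity
theorem pvFold_id (M : Int) (redundancia : Bool) (hM : M < 1)
    (l : List Int) (st : List Int × List (List (String × String))) :
    l.foldl (fun st spine => pvLeafA M redundancia spine st) st = st := by
  have hstep : ∀ (spine : Int) (st' : List Int × List (List (String × String))),
      pvLeafA M redundancia spine st' = st' := by
    intro spine st'
    simp [pvLeafA, PySem.List.pyRange_one_eq_nil (by omega : M + 1 ≤ 1)]
  induction l generalizing st with
  | nil => rfl
  | cons x xs ih =>
    rw [List.foldl_cons, hstep]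
    exact ih st

-- ===== VERDICT (by name: the statement is the Claim_ definition above) =====
theorem generar_ips_enlaces_spec : Claim_equal_generar_ips_enlaces := by
  intro N M redundancia _ hpre
  unfold Spec_generar_ips_enlaces generar_ips_enlaces generar_ips_enlaces_alt
  simp only []
  set k : Int := if redundancia then 2 else 1 with hkdef
  have hk1 : 1 ≤ k := by rcases Bool.eq_false_or_eq_true redundancia with h | h <;> simp [hkdef, h]
  have hstart : ((PySem.List.pyRange 0 16384 1).map (fun i => 167772160 + 4 * i)) = pvSubsFrom 0 := rfl
  by_cases hN : N < 1
  · rw [if_pos (Or.inl hN)]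
    rw [PySem.List.pyRange_one_eq_nil (by omega : N + 1 ≤ 1)]
    rfl
  · by_cases hM : M < 1
    · rw [if_pos (Or.inr hM), hstart, pvFold_id M redundancia hM]
    · rw [if_neg (by omega : ¬(N < 1 ∨ M < 1))]
      unfold Pre_generar_ips_enlaces at hpre
      rw [show max N 0 = N from by omega, show max M 0 = M from by omega] at hpre
      rw [if_neg (not_lt.mpr hpre)]
      have hNnat : N = ((N.toNat : Nat) : Int) := by omega
      have := pvSpineA_run redundancia M N.toNat (by omega)
        (by rw [← hkdef, ← hNnat]; exact hpre)
      rw [← hkdef] at this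
      rw [hstart, show N + 1 = ((N.toNat : Nat) : Int) + 1 from by omega, this, ← hNnat]
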